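-- pv_equiv track=rewrite | github.com/shaikabbas7/GUVI | number.py | check_pow
-- ===== SOURCE A (Python) =====
-- def check_pow(N, k):
--     if k < 0 or N < 0:
--         raise ValueError("k and N must be greater than 0")
--     if k == 0 and N == 1:
--         return True
--     if k in (0, 1) and N != 1:
--         return False
--
--     num = k
--     while num < N:
--         num *= k
--     return num == N
-- ===== SOURCE B (Python) =====
-- def check_pow(N, k):
--     if k < 0 or N < 0:
--         raise ValueError("k and N must be greater than 0")
--     if k == 0 and N == 1:
--         return True
--     if k in (0, 1):
--         return N == 1
--     if N < k:
--         return False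
--     while N % k == 0:
--         N //= k
--     return N == 1
-- ===== Notes on version B (the rewrite author's own statement) =====
-- stated objective: alternative
-- what changed: B decides the question by dividing N down by k (while N % k == 0: N //= k; return N == 1) instead of multiplying a running product up toward N, with an explicit N < k early-out reproducing A's rule that only exponents >= 1 count.
import Mathlib
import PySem

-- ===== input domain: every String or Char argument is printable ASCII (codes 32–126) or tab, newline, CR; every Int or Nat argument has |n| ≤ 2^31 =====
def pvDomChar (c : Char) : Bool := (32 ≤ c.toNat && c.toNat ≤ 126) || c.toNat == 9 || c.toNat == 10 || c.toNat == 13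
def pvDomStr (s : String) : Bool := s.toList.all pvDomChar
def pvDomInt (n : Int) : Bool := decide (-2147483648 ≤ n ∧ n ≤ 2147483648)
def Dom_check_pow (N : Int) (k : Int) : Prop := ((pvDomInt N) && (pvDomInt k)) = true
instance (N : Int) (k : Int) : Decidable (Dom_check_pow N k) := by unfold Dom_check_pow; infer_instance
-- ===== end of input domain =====

-- B decides "N is an exact power of k" by dividing N down by k instead of A's multiplying a
-- running product up toward N (objective: alternative; same asymptotic cost).

-- ===== PORT A =====
-- while num < N: num *= k   (the extra 'num < num * k' conjunct only makes the recursion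
-- well-founded; on every call the port makes, k ≥ 2 and num ≥ 1, so it always holds there)
def aloopA (N k num : Int) : Int :=
  if _h : num < N ∧ num < num * k then aloopA N k (num * k) else num
termination_by (N - num).toNat
decreasing_by omega

def check_pow (N : Int) (k : Int) : Bool :=
  if k == 0 && N == 1 then true
  else if (k == 0 || k == 1) && N != 1 then false
  else aloopA N k k == N

-- ===== PORT B =====
-- while N % k == 0: N //= k   (the extra '2 ≤ k ∧ k ≤ N' conjuncts only make the recursion
-- well-founded; on every call the port makes, k ≥ 2 and N ≥ 1, where they are implied by N % k == 0)
def bloopB (k N : Int) : Int :=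
  if h : PySem.Int.mod N k = 0 ∧ 2 ≤ k ∧ k ≤ N then bloopB k (PySem.Int.floordiv N k) else N
termination_by N.toNat
decreasing_by
  obtain ⟨hm, hk2, hkN⟩ := h
  have hfd : PySem.Int.floordiv N k = N / k := PySem.Int.floordiv_eq_ediv_of_pos (by omega)
  have h1 : N / k < N := by rw [Int.ediv_lt_iff_lt_mul (by omega)]; nlinarith
  have h2 : 0 ≤ N / k := Int.ediv_nonneg (by omega) (by omega)
  omega

def check_pow_alt (N : Int) (k : Int) : Bool :=
  if k == 0 && N == 1 then true
  else if k == 0 || k == 1 then N == 1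
  else if N < k then false
  else bloopB k N == 1

-- ===== PRECONDITION & SPEC =====
-- Pre_ excludes exactly the inputs on which A raises ValueError (k < 0 or N < 0).
def Pre_check_pow (N : Int) (k : Int) : Prop := 0 ≤ N ∧ 0 ≤ k
instance (N : Int) (k : Int) : Decidable (Pre_check_pow N k) := by unfold Pre_check_pow; infer_instance
def pvWitness_check_pow : Int × Int := (8, 2)

def Spec_check_pow (N : Int) (k : Int) (out : Bool) : Prop := out = check_pow_alt N k
instance (N : Int) (k : Int) (out : Bool) : Decidable (Spec_check_pow N k out) := by unfold Spec_check_pow; infer_instance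

-- ===== CLAIM (what is proved, stated in full; the proofs are below) =====
def Claim_equal_check_pow : Prop := ∀ (N : Int) (k : Int), Dom_check_pow N k → Pre_check_pow N k → Spec_check_pow N k (check_pow N k)

-- ===== LEMMAS AND PROOFS =====

-- A's loop reaches N exactly when N = num · k^j for some j ≥ 0 (k ≥ 2, num ≥ 1).
theorem aloop_char (N k : Int) (hk : 2 ≤ k) :
    ∀ (n : ℕ) (num : Int), (N - num).toNat = n → 1 ≤ num →
      (aloopA N k num = N ↔ ∃ j : ℕ, num * k ^ j = N) := by
  intro n
  induction n using Nat.strong_induction_on with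
  | _ n ih =>
    intro num hn h1
    rw [aloopA]
    by_cases hlt : num < N
    · have hmul : num < num * k := by nlinarith
      rw [dif_pos ⟨hlt, hmul⟩]
      have h1' : 1 ≤ num * k := by nlinarith
      rw [ih (N - num * k).toNat (by omega) (num * k) rfl h1']
      constructor
      · rintro ⟨j, hj⟩
        exact ⟨j + 1, by rw [pow_succ]; linear_combination hj⟩
      · rintro ⟨j, hj⟩
        cases j with
        | zero => simp at hj; omega
        | succ j => exact ⟨j, by rw [pow_succ] at hj; linear_combination hj⟩
    · rw [dif_neg (by tauto)]
      constructor
      · intro h; exact ⟨0, by simpa using h⟩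
      · rintro ⟨j, hj⟩
        have hkj : (1 : Int) ≤ k ^ j := one_le_pow₀ (by omega)
        have : num ≤ num * k ^ j := le_mul_of_one_le_right (by omega) hkj
        omega

-- B's loop ends at 1 exactly when N is a power of k (k ≥ 2, N ≥ 1).
theorem bloop_char (k : Int) (hk : 2 ≤ k) :
    ∀ (n : ℕ) (N : Int), N.toNat = n → 1 ≤ N →
      (bloopB k N = 1 ↔ ∃ m : ℕ, k ^ m = N) := by
  intro n
  induction n using Nat.strong_induction_on with
  | _ n ih =>
    intro N hn h1
    rw [bloopB]
    by_cases hc : PySem.Int.mod N k = 0 ∧ 2 ≤ k ∧ k ≤ N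
    · rw [dif_pos hc]
      obtain ⟨hm0, -, hkN⟩ := hc
      obtain ⟨q, hq⟩ := (PySem.Int.mod_eq_zero_iff_dvd N k).mp hm0
      have hq1 : 1 ≤ q := by nlinarith
      have hfd : PySem.Int.floordiv N k = N / k := PySem.Int.floordiv_eq_ediv_of_pos (by omega)
      have hNk : N / k = q := by rw [hq]; exact Int.mul_ediv_cancel_left q (by omega)
      have hqlt : q < N := by nlinarith
      rw [hfd, hNk, ih q.toNat (by omega) q rfl hq1]
      constructor
      · rintro ⟨m, hmq⟩
        exact ⟨m + 1, by rw [pow_succ, hmq, hq]; ring⟩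
      · rintro ⟨m, hmN⟩
        cases m with
        | zero => simp at hmN; omega
        | succ m =>
          refine ⟨m, ?_⟩
          rw [pow_succ] at hmN
          have : k ^ m * k = q * k := by rw [hmN, hq]; ring
          exact mul_right_cancel₀ (by omega) this
    · rw [dif_neg hc]
      constructor
      · intro h; exact ⟨0, by rw [h]; simp⟩
      · rintro ⟨m, hmN⟩
        cases m with
        | zero => simpa using hmN.symm
        | succ m =>
          exfalso; apply hc
          have hdvd : k ∣ N := ⟨k ^ m, by rw [← hmN, pow_succ]; ring⟩
          refine ⟨(PySem.Int.mod_eq_zero_iff_dvd N k).mpr hdvd, hk, ?_⟩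
          have hkm : (1 : Int) ≤ k ^ m := one_le_pow₀ (by omega)
          rw [← hmN, pow_succ]; nlinarith

-- ===== VERDICT (by name: the statement is the Claim_ definition above) =====
theorem check_pow_spec : Claim_equal_check_pow := by
  intro N k _ hpre
  obtain ⟨hN, hk0⟩ := hpre
  show check_pow N k = check_pow_alt N k
  have hcases : k = 0 ∨ k = 1 ∨ 2 ≤ k := by omega
  rcases hcases with hk | hk | hk
  · subst hk
    by_cases h1 : N = 1 <;> simp [check_pow, check_pow_alt, h1]
  · subst hk
    by_cases h1 : N = 1
    · subst h1
      simp only [check_pow, check_pow_alt]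
      rw [aloopA]
      norm_num
    · simp [check_pow, check_pow_alt, h1]
  · have hg1 : ¬ ((k == 0 && N == 1) = true) := by simp; omega
    have hg2 : ¬ (((k == 0 || k == 1) && N != 1) = true) := by simp; omega
    have hg3 : ¬ ((k == 0 || k == 1) = true) := by simp; omega
    rw [check_pow, check_pow_alt, if_neg hg1, if_neg hg2, if_neg hg1, if_neg hg3]
    by_cases hNk : N < k
    · rw [if_pos (by simpa using hNk), aloopA, dif_neg (by omega)]
      simp; omega
    · rw [if_neg (by simpa using hNk)]
      have hA := aloop_char N k hk (N - k).toNat k rfl (by omega)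
      have hB := bloop_char k hk N.toNat N rfl (by omega)
      have hiff : aloopA N k k = N ↔ bloopB k N = 1 := by
        rw [hA, hB]
        constructor
        · rintro ⟨j, hj⟩
          exact ⟨j + 1, by rw [pow_succ]; linear_combination hj⟩
        · rintro ⟨m, hm⟩
          cases m with
          | zero => simp at hm; omega
          | succ m => exact ⟨m, by rw [pow_succ] at hm; linear_combination hm⟩
      rcases iff_iff_and_or_not_and_not.mp hiff with ⟨h1, h2⟩ | ⟨h1, h2⟩
      · rw [beq_iff_eq.mpr h1, beq_iff_eq.mpr h2]
      · rw [beq_eq_false_iff_ne.mpr h1, beq_eq_false_iff_ne.mpr h2]
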